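-- pv_equiv track=rewrite | github.com/PVY-Smit/MLG381_Project | SRC/prepare_data.py | worst_stage_index
-- ===== SOURCE A (Python) =====
-- def worst_stage_index(labels: list) -> int:
--     """Pick class index used as 'high risk' for SHAP and messaging."""
--     lowered = [str(x).lower() for x in labels]
--     for i, name in enumerate(lowered):
--         if any(
--             k in name
--             for k in ("type 2", "type2", "t2dm", "stage 3", "severe")
--         ):
--             return i
--     for i, name in enumerate(lowered):
--         if "type 1" in name or "type1" in name or "t1dm" in name:
--             return i
--     for i, name in enumerate(lowered):
--         if "pre" in name or "prediabetes" in name or "borderline" in name: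
--             return i
--     return len(labels) - 1
-- ===== SOURCE B (Python) =====
-- def worst_stage_index(labels: list) -> int:
--     """Pick class index used as 'high risk' for SHAP and messaging."""
--     t2 = None
--     t3 = None
--     for i, x in enumerate(labels):
--         name = str(x).lower()
--         if "type 2" in name or "type2" in name or "t2dm" in name or "stage 3" in name or "severe" in name:
--             return i
--         if t2 is None and ("type 1" in name or "type1" in name or "t1dm" in name):
--             t2 = i
--         elif t3 is None and ("pre" in name or "borderline" in name):
--             t3 = i
--     if t2 is not None:
--         return t2
--     if t3 is not None:
--         return t3
--     return len(labels) - 1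
-- ===== Notes on version B (the rewrite author's own statement) =====
-- stated objective: alternative
-- what changed: Replaces A's three sequential full scans (and the upfront lowered-list allocation) with a single pass that lowers each label once, returns immediately on a tier-1 match and records only the first tier-2 and tier-3 indices, resolving the priority after the loop.
import Mathlib
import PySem

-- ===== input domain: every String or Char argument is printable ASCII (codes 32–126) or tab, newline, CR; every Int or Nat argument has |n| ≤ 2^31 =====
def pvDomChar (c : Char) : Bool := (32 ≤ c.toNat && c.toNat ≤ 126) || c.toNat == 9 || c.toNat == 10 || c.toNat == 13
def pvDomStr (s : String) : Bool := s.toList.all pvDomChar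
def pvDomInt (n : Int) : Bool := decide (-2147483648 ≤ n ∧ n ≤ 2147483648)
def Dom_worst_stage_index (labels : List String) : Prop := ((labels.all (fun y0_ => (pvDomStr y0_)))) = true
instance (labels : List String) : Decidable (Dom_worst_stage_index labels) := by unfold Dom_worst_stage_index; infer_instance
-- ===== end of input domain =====

-- B replaces A's three sequential scans over a pre-lowered list by one pass that lowers each
-- label once, returns at once on a tier-1 match and records the first tier-2/tier-3 indices
-- (objective: alternative decomposition; return value only, no side effects involved).

-- ===== PORT A =====
-- A's tier predicates on an already-lowered name
def pvA1 (name : String) : Bool :=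
  (["type 2", "type2", "t2dm", "stage 3", "severe"] : List String).any
    (fun k => PySem.Str.isIn k name)
def pvA2 (name : String) : Bool :=
  PySem.Str.isIn "type 1" name || PySem.Str.isIn "type1" name || PySem.Str.isIn "t1dm" name
def pvA3 (name : String) : Bool :=
  PySem.Str.isIn "pre" name || PySem.Str.isIn "prediabetes" name || PySem.Str.isIn "borderline" name

-- 'for i, name in enumerate(lowered): if p name: return i'
def pvScanA (p : String → Bool) : List String → Int → Option Int
  | [], _ => none
  | x :: xs, i => if p x then some i else pvScanA p xs (i + 1)

def worst_stage_index (labels : List String) : Int :=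
  let lowered := labels.map PySem.Str.lower
  match pvScanA pvA1 lowered 0 with
  | some i => i
  | none =>
    match pvScanA pvA2 lowered 0 with
    | some i => i
    | none =>
      match pvScanA pvA3 lowered 0 with
      | some i => i
      | none => (labels.length : Int) - 1

-- ===== PORT B =====
def pvB1 (name : String) : Bool :=
  PySem.Str.isIn "type 2" name || PySem.Str.isIn "type2" name || PySem.Str.isIn "t2dm" name
    || PySem.Str.isIn "stage 3" name || PySem.Str.isIn "severe" name
def pvB2 (name : String) : Bool :=
  PySem.Str.isIn "type 1" name || PySem.Str.isIn "type1" name || PySem.Str.isIn "t1dm" name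
def pvB3 (name : String) : Bool :=
  PySem.Str.isIn "pre" name || PySem.Str.isIn "borderline" name

-- the single pass of Source B: i is the running index, t2/t3 the recorded indices, n = len(labels)
def pvLoopB (n : Int) : List String → Int → Option Int → Option Int → Int
  | [], _, t2, t3 =>
    match t2 with
    | some j => j
    | none =>
      match t3 with
      | some j => j
      | none => n - 1
  | x :: xs, i, t2, t3 =>
    let name := PySem.Str.lower x
    if pvB1 name then i
    else if t2.isNone && pvB2 name then pvLoopB n xs (i + 1) (some i) t3
    else if t3.isNone && pvB3 name then pvLoopB n xs (i + 1) t2 (some i)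
    else pvLoopB n xs (i + 1) t2 t3

def worst_stage_index_alt (labels : List String) : Int :=
  pvLoopB (labels.length : Int) labels 0 none none

-- ===== PRECONDITION & SPEC =====
def Spec_worst_stage_index (labels : List String) (out : Int) : Prop := out = worst_stage_index_alt labels
instance (labels : List String) (out : Int) : Decidable (Spec_worst_stage_index labels out) := by unfold Spec_worst_stage_index; infer_instance

-- ===== CLAIM (what is proved, stated in full; the proofs are below) =====
def Claim_equal_worst_stage_index : Prop := ∀ (labels : List String), Dom_worst_stage_index labels → Spec_worst_stage_index labels (worst_stage_index labels)

-- ===== LEMMAS AND PROOFS =====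

-- scanning the lowered list = scanning the raw list with the predicate composed with lower
theorem pvScanA_map (p : String → Bool) (ls : List String) (i : Int) :
    pvScanA p (ls.map PySem.Str.lower) i = pvScanA (fun x => p (PySem.Str.lower x)) ls i := by
  induction ls generalizing i with
  | nil => rfl
  | cons x xs ih => simp [pvScanA, ih]

theorem pvA1_eq (name : String) : pvA1 name = pvB1 name := by
  simp [pvA1, pvB1, List.any, Bool.or_assoc]

theorem pvA2_eq (name : String) : pvA2 name = pvB2 name := rfl

-- "pre" is a prefix of "prediabetes", so the "prediabetes" test is absorbed by the "pre" test
theorem pvA3_eq (name : String) : pvA3 name = pvB3 name := by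
  unfold pvA3 pvB3
  cases h : PySem.Str.isIn "prediabetes" name with
  | false => simp
  | true =>
    have hpre : PySem.Chars.isIn ['p', 'r', 'e'] name.toList = true := by
      rw [PySem.Chars.isIn_iff_infix]
      exact List.IsInfix.trans (by decide) ((PySem.Str.isIn_iff_infix _ _).mp h)
    simp
    exact Or.inl hpre

-- invariant of B's single pass: a tier-1 hit wins; otherwise recorded t2, else first tier-2
-- match; otherwise recorded t3, else first tier-3 match; otherwise n - 1
theorem pvLoopB_inv (n : Int) (ls : List String) (i : Int) (t2 t3 : Option Int) :
    pvLoopB n ls i t2 t3 =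
      match pvScanA (fun x => pvB1 (PySem.Str.lower x)) ls i with
      | some j => j
      | none =>
        match t2.or (pvScanA (fun x => pvB2 (PySem.Str.lower x)) ls i) with
        | some j => j
        | none =>
          match t3.or (pvScanA (fun x => pvB3 (PySem.Str.lower x)) ls i) with
          | some j => j
          | none => n - 1 := by
  induction ls generalizing i t2 t3 with
  | nil => cases t2 <;> cases t3 <;> rfl
  | cons x xs ih =>
    by_cases h1 : pvB1 (PySem.Str.lower x) = true
    · simp [pvLoopB, pvScanA, h1]
    · by_cases h2 : t2.isNone && pvB2 (PySem.Str.lower x) = true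
      · have ht2 : t2 = none := by
          cases t2 <;> simp_all
        have hb2 : pvB2 (PySem.Str.lower x) = true := by simp_all
        simp [pvLoopB, pvScanA, h1, ih, ht2, hb2, Option.or]
      · by_cases h3 : t3.isNone && pvB3 (PySem.Str.lower x) = true
        · have ht3 : t3 = none := by cases t3 <;> simp_all
          have hb3 : pvB3 (PySem.Str.lower x) = true := by simp_all
          have hb2' : t2 = none → pvB2 (PySem.Str.lower x) = false := by
            intro h; cases hb : pvB2 (PySem.Str.lower x) <;> simp_all
          cases t2 with
          | some j => simp [pvLoopB, pvScanA, h1, ih, ht3, hb3, Option.or]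
          | none =>
            simp [pvLoopB, pvScanA, h1, ih, ht3, hb3, hb2' rfl, Option.or]
        · cases t2 with
          | some j => simp [pvLoopB, pvScanA, h1, ih, Option.or]
          | none =>
            have hb2' : pvB2 (PySem.Str.lower x) = false := by
              cases hb : pvB2 (PySem.Str.lower x) <;> simp_all
            cases t3 with
            | some j => simp [pvLoopB, pvScanA, h1, ih, hb2', Option.or]
            | none =>
              have hb3' : pvB3 (PySem.Str.lower x) = false := by
                cases hb : pvB3 (PySem.Str.lower x) <;> simp_all
              simp [pvLoopB, pvScanA, h1, ih, hb2', hb3', Option.or]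

-- ===== VERDICT (by name: the statement is the Claim_ definition above) =====
theorem worst_stage_index_spec : Claim_equal_worst_stage_index := by
  intro labels _
  unfold Spec_worst_stage_index worst_stage_index worst_stage_index_alt
  rw [pvLoopB_inv]
  simp only [pvScanA_map]
  have e1 : (fun x => pvA1 (PySem.Str.lower x)) = (fun x => pvB1 (PySem.Str.lower x)) := by
    funext x; exact pvA1_eq _
  have e2 : (fun x => pvA2 (PySem.Str.lower x)) = (fun x => pvB2 (PySem.Str.lower x)) := by
    funext x; exact pvA2_eq _
  have e3 : (fun x => pvA3 (PySem.Str.lower x)) = (fun x => pvB3 (PySem.Str.lower x)) := by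
    funext x; exact pvA3_eq _
  rw [e1, e2, e3]
  cases pvScanA (fun x => pvB1 (PySem.Str.lower x)) labels 0 with
  | some j => rfl
  | none =>
    cases pvScanA (fun x => pvB2 (PySem.Str.lower x)) labels 0 <;>
      cases pvScanA (fun x => pvB3 (PySem.Str.lower x)) labels 0 <;> rfl
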